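-- pv_equiv track=rewrite | github.com/qqoqto/scamradar | app/services/phone_analyzer.py | _get_area_name
-- ===== SOURCE A (Python) =====
-- def _get_area_name(number: str) -> str:
--     """Get area name from Taiwan landline prefix."""
--     area_codes = {
--         "02": "台北/新北",
--         "03": "桃園/新竹/宜蘭/花蓮",
--         "04": "台中/彰化",
--         "05": "嘉義/雲林",
--         "06": "台南",
--         "07": "高雄",
--         "08": "屏東/台東",
--         "037": "苗栗",
--         "049": "南投",
--         "089": "台東",
--     }
--     for prefix, name in sorted(area_codes.items(), key=lambda x: -len(x[0])):
--         if number.startswith(prefix):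
--             return name
--     return "未知區域"
-- ===== SOURCE B (Python) =====
-- _THREE = {"037": "苗栗", "049": "南投", "089": "台東"}
-- _TWO = {
--     "02": "台北/新北",
--     "03": "桃園/新竹/宜蘭/花蓮",
--     "04": "台中/彰化",
--     "05": "嘉義/雲林",
--     "06": "台南",
--     "07": "高雄",
--     "08": "屏東/台東",
-- }
--
-- def _get_area_name(number: str) -> str:
--     """Get area name from Taiwan landline prefix."""
--     p3 = number[:3]
--     if p3 in _THREE:
--         return _THREE[p3]
--     p2 = number[:2]
--     if p2 in _TWO:
--         return _TWO[p2]
--     return "未知區域"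
-- ===== Notes on version B (the rewrite author's own statement) =====
-- stated objective: simpler
-- what changed: Replaces the sort-by-descending-key-length plus linear startswith scan with two length-keyed dicts and two direct slice lookups (3-char prefix first, then 2-char).
import Mathlib
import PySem

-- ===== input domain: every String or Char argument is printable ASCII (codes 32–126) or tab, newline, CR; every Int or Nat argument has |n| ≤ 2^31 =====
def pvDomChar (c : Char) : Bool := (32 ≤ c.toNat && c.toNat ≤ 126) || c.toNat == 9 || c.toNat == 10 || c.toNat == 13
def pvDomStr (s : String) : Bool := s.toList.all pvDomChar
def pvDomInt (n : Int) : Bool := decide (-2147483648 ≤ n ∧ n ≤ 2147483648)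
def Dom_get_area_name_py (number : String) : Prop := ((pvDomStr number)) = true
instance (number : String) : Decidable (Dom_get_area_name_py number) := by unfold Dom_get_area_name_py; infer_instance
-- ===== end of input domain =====

-- B replaces A's sort-by-descending-length + linear startswith scan with two
-- length-keyed dicts and two direct slice lookups (simpler; same return value).

-- ===== PORT A =====
-- the for-loop over the sorted items: first matching prefix wins, else the default
def pvAreaLoop (number : String) : List (String × String) → String
  | [] => "未知區域"
  | (pfx, name) :: rest =>
      if PySem.Str.startswith number pfx then name else pvAreaLoop number rest

def get_area_name_py (number : String) : String :=
  let area_codes : PySem.Dict String String := PySem.Dict.ofList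
    [("02", "台北/新北"), ("03", "桃園/新竹/宜蘭/花蓮"), ("04", "台中/彰化"), ("05", "嘉義/雲林"), ("06", "台南"), ("07", "高雄"), ("08", "屏東/台東"), ("037", "苗栗"), ("049", "南投"), ("089", "台東")]
  pvAreaLoop number
    (PySem.List.sorted area_codes.items (fun x => -(PySem.Str.len x.1 : Int)))

-- ===== PORT B =====
def pvTHREE : PySem.Dict String String :=
  PySem.Dict.ofList [("037", "苗栗"), ("049", "南投"), ("089", "台東")]

def pvTWO : PySem.Dict String String :=
  PySem.Dict.ofList [("02", "台北/新北"), ("03", "桃園/新竹/宜蘭/花蓮"), ("04", "台中/彰化"), ("05", "嘉義/雲林"), ("06", "台南"), ("07", "高雄"), ("08", "屏東/台東")]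

def get_area_name_py_alt (number : String) : String :=
  let p3 := PySem.Str.slice number none (some 3)
  match pvTHREE.get? p3 with
  | some name => name
  | none =>
    let p2 := PySem.Str.slice number none (some 2)
    match pvTWO.get? p2 with
    | some name => name
    | none => "未知區域"

-- ===== PRECONDITION & SPEC =====
def Spec_get_area_name_py (number : String) (out : String) : Prop := out = get_area_name_py_alt number
instance (number : String) (out : String) : Decidable (Spec_get_area_name_py number out) := by unfold Spec_get_area_name_py; infer_instance

-- ===== CLAIM (what is proved, stated in full; the proofs are below) =====
def Claim_equal_get_area_name_py : Prop := ∀ (number : String), Dom_get_area_name_py number → Spec_get_area_name_py number (get_area_name_py number)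

-- ===== LEMMAS AND PROOFS =====

-- startswith p is the same test as "p equals the length-|p| front slice"
theorem pv_sw_slice (number p : String) (n : Nat) (hl : p.toList.length = n) :
    (PySem.Str.startswith number p = true) ↔ p = PySem.Str.slice number none (some (n : Int)) := by
  rw [← String.toList_inj]
  simp [PySem.Chars.startswith_iff, List.prefix_iff_eq_take, PySem.List.slice_to_natCast, hl]

theorem pv_main (number : String) : get_area_name_py number = get_area_name_py_alt number := by
  have e3 : pvTHREE = ⟨[("037", "苗栗"), ("049", "南投"), ("089", "台東")]⟩ := by decide
  have e2 : pvTWO = ⟨[("02", "台北/新北"), ("03", "桃園/新竹/宜蘭/花蓮"), ("04", "台中/彰化"), ("05", "嘉義/雲林"), ("06", "台南"), ("07", "高雄"), ("08", "屏東/台東")]⟩ := by decide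
  have hsorted : PySem.List.sorted (PySem.Dict.ofList
      [("02", "台北/新北"), ("03", "桃園/新竹/宜蘭/花蓮"), ("04", "台中/彰化"), ("05", "嘉義/雲林"), ("06", "台南"), ("07", "高雄"), ("08", "屏東/台東"), ("037", "苗栗"), ("049", "南投"), ("089", "台東")] : PySem.Dict String String).items
      (fun x => -(PySem.Str.len x.1 : Int)) = [("037", "苗栗"), ("049", "南投"), ("089", "台東"), ("02", "台北/新北"), ("03", "桃園/新竹/宜蘭/花蓮"), ("04", "台中/彰化"), ("05", "嘉義/雲林"), ("06", "台南"), ("07", "高雄"), ("08", "屏東/台東")] := by decide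
  show pvAreaLoop number _ = _
  rw [hsorted]
  unfold get_area_name_py_alt
  rw [e3, e2]
  by_cases h037 : ("037" : String) = PySem.Str.slice number none (some 3)
  case pos =>
    have b037 : PySem.Str.startswith number "037" = true := (pv_sw_slice number "037" 3 rfl).mpr h037
    trans "苗栗"
    · simp only [pvAreaLoop, b037]; simp
    · symm; simp [PySem.Dict.get?, h037]
  case neg =>
    by_cases h049 : ("049" : String) = PySem.Str.slice number none (some 3)
    case pos =>
      have b037 : PySem.Str.startswith number "037" = false := (Bool.eq_false_iff).mpr (fun hb => h037 ((pv_sw_slice number "037" 3 rfl).mp hb))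
      have b049 : PySem.Str.startswith number "049" = true := (pv_sw_slice number "049" 3 rfl).mpr h049
      trans "南投"
      · simp only [pvAreaLoop, b037, b049]; simp
      · symm; simp [PySem.Dict.get?, h037, h049]
    case neg =>
      by_cases h089 : ("089" : String) = PySem.Str.slice number none (some 3)
      case pos =>
        have b037 : PySem.Str.startswith number "037" = false := (Bool.eq_false_iff).mpr (fun hb => h037 ((pv_sw_slice number "037" 3 rfl).mp hb))
        have b049 : PySem.Str.startswith number "049" = false := (Bool.eq_false_iff).mpr (fun hb => h049 ((pv_sw_slice number "049" 3 rfl).mp hb))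
        have b089 : PySem.Str.startswith number "089" = true := (pv_sw_slice number "089" 3 rfl).mpr h089
        trans "台東"
        · simp only [pvAreaLoop, b037, b049, b089]; simp
        · symm; simp [PySem.Dict.get?, h037, h049, h089]
      case neg =>
        by_cases h02 : ("02" : String) = PySem.Str.slice number none (some 2)
        case pos =>
          have b037 : PySem.Str.startswith number "037" = false := (Bool.eq_false_iff).mpr (fun hb => h037 ((pv_sw_slice number "037" 3 rfl).mp hb))
          have b049 : PySem.Str.startswith number "049" = false := (Bool.eq_false_iff).mpr (fun hb => h049 ((pv_sw_slice number "049" 3 rfl).mp hb))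
          have b089 : PySem.Str.startswith number "089" = false := (Bool.eq_false_iff).mpr (fun hb => h089 ((pv_sw_slice number "089" 3 rfl).mp hb))
          have b02 : PySem.Str.startswith number "02" = true := (pv_sw_slice number "02" 2 rfl).mpr h02
          trans "台北/新北"
          · simp only [pvAreaLoop, b037, b049, b089, b02]; simp
          · symm; simp [PySem.Dict.get?, h037, h049, h089, h02]
        case neg =>
          by_cases h03 : ("03" : String) = PySem.Str.slice number none (some 2)
          case pos =>
            have b037 : PySem.Str.startswith number "037" = false := (Bool.eq_false_iff).mpr (fun hb => h037 ((pv_sw_slice number "037" 3 rfl).mp hb))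
            have b049 : PySem.Str.startswith number "049" = false := (Bool.eq_false_iff).mpr (fun hb => h049 ((pv_sw_slice number "049" 3 rfl).mp hb))
            have b089 : PySem.Str.startswith number "089" = false := (Bool.eq_false_iff).mpr (fun hb => h089 ((pv_sw_slice number "089" 3 rfl).mp hb))
            have b02 : PySem.Str.startswith number "02" = false := (Bool.eq_false_iff).mpr (fun hb => h02 ((pv_sw_slice number "02" 2 rfl).mp hb))
            have b03 : PySem.Str.startswith number "03" = true := (pv_sw_slice number "03" 2 rfl).mpr h03
            trans "桃園/新竹/宜蘭/花蓮"
            · simp only [pvAreaLoop, b037, b049, b089, b02, b03]; simp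
            · symm; simp [PySem.Dict.get?, h037, h049, h089, h02, h03]
          case neg =>
            by_cases h04 : ("04" : String) = PySem.Str.slice number none (some 2)
            case pos =>
              have b037 : PySem.Str.startswith number "037" = false := (Bool.eq_false_iff).mpr (fun hb => h037 ((pv_sw_slice number "037" 3 rfl).mp hb))
              have b049 : PySem.Str.startswith number "049" = false := (Bool.eq_false_iff).mpr (fun hb => h049 ((pv_sw_slice number "049" 3 rfl).mp hb))
              have b089 : PySem.Str.startswith number "089" = false := (Bool.eq_false_iff).mpr (fun hb => h089 ((pv_sw_slice number "089" 3 rfl).mp hb))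
              have b02 : PySem.Str.startswith number "02" = false := (Bool.eq_false_iff).mpr (fun hb => h02 ((pv_sw_slice number "02" 2 rfl).mp hb))
              have b03 : PySem.Str.startswith number "03" = false := (Bool.eq_false_iff).mpr (fun hb => h03 ((pv_sw_slice number "03" 2 rfl).mp hb))
              have b04 : PySem.Str.startswith number "04" = true := (pv_sw_slice number "04" 2 rfl).mpr h04
              trans "台中/彰化"
              · simp only [pvAreaLoop, b037, b049, b089, b02, b03, b04]; simp
              · symm; simp [PySem.Dict.get?, h037, h049, h089, h02, h03, h04]
            case neg =>
              by_cases h05 : ("05" : String) = PySem.Str.slice number none (some 2)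
              case pos =>
                have b037 : PySem.Str.startswith number "037" = false := (Bool.eq_false_iff).mpr (fun hb => h037 ((pv_sw_slice number "037" 3 rfl).mp hb))
                have b049 : PySem.Str.startswith number "049" = false := (Bool.eq_false_iff).mpr (fun hb => h049 ((pv_sw_slice number "049" 3 rfl).mp hb))
                have b089 : PySem.Str.startswith number "089" = false := (Bool.eq_false_iff).mpr (fun hb => h089 ((pv_sw_slice number "089" 3 rfl).mp hb))
                have b02 : PySem.Str.startswith number "02" = false := (Bool.eq_false_iff).mpr (fun hb => h02 ((pv_sw_slice number "02" 2 rfl).mp hb))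
                have b03 : PySem.Str.startswith number "03" = false := (Bool.eq_false_iff).mpr (fun hb => h03 ((pv_sw_slice number "03" 2 rfl).mp hb))
                have b04 : PySem.Str.startswith number "04" = false := (Bool.eq_false_iff).mpr (fun hb => h04 ((pv_sw_slice number "04" 2 rfl).mp hb))
                have b05 : PySem.Str.startswith number "05" = true := (pv_sw_slice number "05" 2 rfl).mpr h05
                trans "嘉義/雲林"
                · simp only [pvAreaLoop, b037, b049, b089, b02, b03, b04, b05]; simp
                · symm; simp [PySem.Dict.get?, h037, h049, h089, h02, h03, h04, h05]
              case neg =>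
                by_cases h06 : ("06" : String) = PySem.Str.slice number none (some 2)
                case pos =>
                  have b037 : PySem.Str.startswith number "037" = false := (Bool.eq_false_iff).mpr (fun hb => h037 ((pv_sw_slice number "037" 3 rfl).mp hb))
                  have b049 : PySem.Str.startswith number "049" = false := (Bool.eq_false_iff).mpr (fun hb => h049 ((pv_sw_slice number "049" 3 rfl).mp hb))
                  have b089 : PySem.Str.startswith number "089" = false := (Bool.eq_false_iff).mpr (fun hb => h089 ((pv_sw_slice number "089" 3 rfl).mp hb))
                  have b02 : PySem.Str.startswith number "02" = false := (Bool.eq_false_iff).mpr (fun hb => h02 ((pv_sw_slice number "02" 2 rfl).mp hb))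
                  have b03 : PySem.Str.startswith number "03" = false := (Bool.eq_false_iff).mpr (fun hb => h03 ((pv_sw_slice number "03" 2 rfl).mp hb))
                  have b04 : PySem.Str.startswith number "04" = false := (Bool.eq_false_iff).mpr (fun hb => h04 ((pv_sw_slice number "04" 2 rfl).mp hb))
                  have b05 : PySem.Str.startswith number "05" = false := (Bool.eq_false_iff).mpr (fun hb => h05 ((pv_sw_slice number "05" 2 rfl).mp hb))
                  have b06 : PySem.Str.startswith number "06" = true := (pv_sw_slice number "06" 2 rfl).mpr h06
                  trans "台南"
                  · simp only [pvAreaLoop, b037, b049, b089, b02, b03, b04, b05, b06]; simp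
                  · symm; simp [PySem.Dict.get?, h037, h049, h089, h02, h03, h04, h05, h06]
                case neg =>
                  by_cases h07 : ("07" : String) = PySem.Str.slice number none (some 2)
                  case pos =>
                    have b037 : PySem.Str.startswith number "037" = false := (Bool.eq_false_iff).mpr (fun hb => h037 ((pv_sw_slice number "037" 3 rfl).mp hb))
                    have b049 : PySem.Str.startswith number "049" = false := (Bool.eq_false_iff).mpr (fun hb => h049 ((pv_sw_slice number "049" 3 rfl).mp hb))
                    have b089 : PySem.Str.startswith number "089" = false := (Bool.eq_false_iff).mpr (fun hb => h089 ((pv_sw_slice number "089" 3 rfl).mp hb))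
                    have b02 : PySem.Str.startswith number "02" = false := (Bool.eq_false_iff).mpr (fun hb => h02 ((pv_sw_slice number "02" 2 rfl).mp hb))
                    have b03 : PySem.Str.startswith number "03" = false := (Bool.eq_false_iff).mpr (fun hb => h03 ((pv_sw_slice number "03" 2 rfl).mp hb))
                    have b04 : PySem.Str.startswith number "04" = false := (Bool.eq_false_iff).mpr (fun hb => h04 ((pv_sw_slice number "04" 2 rfl).mp hb))
                    have b05 : PySem.Str.startswith number "05" = false := (Bool.eq_false_iff).mpr (fun hb => h05 ((pv_sw_slice number "05" 2 rfl).mp hb))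
                    have b06 : PySem.Str.startswith number "06" = false := (Bool.eq_false_iff).mpr (fun hb => h06 ((pv_sw_slice number "06" 2 rfl).mp hb))
                    have b07 : PySem.Str.startswith number "07" = true := (pv_sw_slice number "07" 2 rfl).mpr h07
                    trans "高雄"
                    · simp only [pvAreaLoop, b037, b049, b089, b02, b03, b04, b05, b06, b07]; simp
                    · symm; simp [PySem.Dict.get?, h037, h049, h089, h02, h03, h04, h05, h06, h07]
                  case neg =>
                    by_cases h08 : ("08" : String) = PySem.Str.slice number none (some 2)
                    case pos =>
                      have b037 : PySem.Str.startswith number "037" = false := (Bool.eq_false_iff).mpr (fun hb => h037 ((pv_sw_slice number "037" 3 rfl).mp hb))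
                      have b049 : PySem.Str.startswith number "049" = false := (Bool.eq_false_iff).mpr (fun hb => h049 ((pv_sw_slice number "049" 3 rfl).mp hb))
                      have b089 : PySem.Str.startswith number "089" = false := (Bool.eq_false_iff).mpr (fun hb => h089 ((pv_sw_slice number "089" 3 rfl).mp hb))
                      have b02 : PySem.Str.startswith number "02" = false := (Bool.eq_false_iff).mpr (fun hb => h02 ((pv_sw_slice number "02" 2 rfl).mp hb))
                      have b03 : PySem.Str.startswith number "03" = false := (Bool.eq_false_iff).mpr (fun hb => h03 ((pv_sw_slice number "03" 2 rfl).mp hb))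
                      have b04 : PySem.Str.startswith number "04" = false := (Bool.eq_false_iff).mpr (fun hb => h04 ((pv_sw_slice number "04" 2 rfl).mp hb))
                      have b05 : PySem.Str.startswith number "05" = false := (Bool.eq_false_iff).mpr (fun hb => h05 ((pv_sw_slice number "05" 2 rfl).mp hb))
                      have b06 : PySem.Str.startswith number "06" = false := (Bool.eq_false_iff).mpr (fun hb => h06 ((pv_sw_slice number "06" 2 rfl).mp hb))
                      have b07 : PySem.Str.startswith number "07" = false := (Bool.eq_false_iff).mpr (fun hb => h07 ((pv_sw_slice number "07" 2 rfl).mp hb))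
                      have b08 : PySem.Str.startswith number "08" = true := (pv_sw_slice number "08" 2 rfl).mpr h08
                      trans "屏東/台東"
                      · simp only [pvAreaLoop, b037, b049, b089, b02, b03, b04, b05, b06, b07, b08]; simp
                      · symm; simp [PySem.Dict.get?, h037, h049, h089, h02, h03, h04, h05, h06, h07, h08]
                    case neg =>
                      have b037 : PySem.Str.startswith number "037" = false := (Bool.eq_false_iff).mpr (fun hb => h037 ((pv_sw_slice number "037" 3 rfl).mp hb))
                      have b049 : PySem.Str.startswith number "049" = false := (Bool.eq_false_iff).mpr (fun hb => h049 ((pv_sw_slice number "049" 3 rfl).mp hb))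
                      have b089 : PySem.Str.startswith number "089" = false := (Bool.eq_false_iff).mpr (fun hb => h089 ((pv_sw_slice number "089" 3 rfl).mp hb))
                      have b02 : PySem.Str.startswith number "02" = false := (Bool.eq_false_iff).mpr (fun hb => h02 ((pv_sw_slice number "02" 2 rfl).mp hb))
                      have b03 : PySem.Str.startswith number "03" = false := (Bool.eq_false_iff).mpr (fun hb => h03 ((pv_sw_slice number "03" 2 rfl).mp hb))
                      have b04 : PySem.Str.startswith number "04" = false := (Bool.eq_false_iff).mpr (fun hb => h04 ((pv_sw_slice number "04" 2 rfl).mp hb))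
                      have b05 : PySem.Str.startswith number "05" = false := (Bool.eq_false_iff).mpr (fun hb => h05 ((pv_sw_slice number "05" 2 rfl).mp hb))
                      have b06 : PySem.Str.startswith number "06" = false := (Bool.eq_false_iff).mpr (fun hb => h06 ((pv_sw_slice number "06" 2 rfl).mp hb))
                      have b07 : PySem.Str.startswith number "07" = false := (Bool.eq_false_iff).mpr (fun hb => h07 ((pv_sw_slice number "07" 2 rfl).mp hb))
                      have b08 : PySem.Str.startswith number "08" = false := (Bool.eq_false_iff).mpr (fun hb => h08 ((pv_sw_slice number "08" 2 rfl).mp hb))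
                      trans "未知區域"
                      · simp only [pvAreaLoop, b037, b049, b089, b02, b03, b04, b05, b06, b07, b08]; simp
                      · symm; simp [PySem.Dict.get?, h037, h049, h089, h02, h03, h04, h05, h06, h07, h08]

-- ===== VERDICT (by name: the statement is the Claim_ definition above) =====
theorem get_area_name_py_spec : Claim_equal_get_area_name_py := by
  intro number _
  exact pv_main number
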